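-- pv_equiv track=rewrite | github.com/Alhad-Manure/NLP_Hindi_Song_Generator | RNN_Based_Approach/LyricsGenerator.py | _remove_repetitions
-- ===== SOURCE A (Python) =====
-- def _remove_repetitions(text: str, max_repeat: int = 2) -> str:
--     """Utility to prevent words looping like 'baby baby baby baby'"""
--     words = text.split()
--     result = []
--     count = 1
--
--     for i, word in enumerate(words):
--         if i == 0 or word != words[i-1]:
--             result.append(word)
--             count = 1
--         elif count < max_repeat:
--             result.append(word)
--             count += 1
--
--     return ' '.join(result)
-- ===== SOURCE B (Python) =====
-- def _remove_repetitions(text: str, max_repeat: int = 2) -> str: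
--     """Run-length approach: find each maximal run of one word, keep at most
--     max(max_repeat, 1) copies of it (the first word of a run is always kept)."""
--     words = text.split()
--     n = len(words)
--     cap = max(max_repeat, 1)
--     out = []
--     i = 0
--     while i < n:
--         j = i + 1
--         while j < n and words[j] == words[i]:
--             j += 1
--         out.extend(words[i:i + min(j - i, cap)])
--         i = j
--     return ' '.join(out)
-- ===== Notes on version B (the rewrite author's own statement) =====
-- stated objective: alternative
-- what changed: Replaces the single pass with previous-word comparison and a running count by a run-length decomposition: an inner scan finds each maximal run of one word and a slice keeps at most max(max_repeat,1) copies of it.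
import Mathlib
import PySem

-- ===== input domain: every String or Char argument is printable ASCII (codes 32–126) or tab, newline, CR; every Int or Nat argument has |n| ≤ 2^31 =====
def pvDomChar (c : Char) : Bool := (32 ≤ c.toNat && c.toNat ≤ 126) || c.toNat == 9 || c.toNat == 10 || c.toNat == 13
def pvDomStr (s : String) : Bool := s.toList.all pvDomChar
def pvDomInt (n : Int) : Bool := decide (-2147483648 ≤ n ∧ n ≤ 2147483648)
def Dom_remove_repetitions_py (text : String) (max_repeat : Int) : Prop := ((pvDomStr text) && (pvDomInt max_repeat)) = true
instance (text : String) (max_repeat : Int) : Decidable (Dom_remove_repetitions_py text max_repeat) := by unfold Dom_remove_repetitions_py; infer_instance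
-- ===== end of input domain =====

-- B is an alternative, run-length decomposition of A's single pass; proved to return the same string on every input.

-- ===== PORT A =====
-- one loop step: 'if i == 0 or word != words[i-1]: append, count=1 elif count < max_repeat: append, count+=1'
def pvAStep (words : List String) (max_repeat : Int)
    (st : List String × Int) (iw : Int × String) : List String × Int :=
  if iw.1 = 0 ∨ ¬ (some iw.2 = PySem.List.pyGet? words (iw.1 - 1)) then
    (st.1 ++ [iw.2], 1)
  else if st.2 < max_repeat then
    (st.1 ++ [iw.2], st.2 + 1)
  else st

def remove_repetitions_py (text : String) (max_repeat : Int) : String :=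
  let words := PySem.Str.split₀ text
  let st := (PySem.List.enumerate words 0).foldl (pvAStep words max_repeat) ([], 1)
  PySem.Str.join " " st.1

-- ===== PORT B =====
-- inner while loop of Source B: 'j = i+1; while j < n and words[j] == words[i]: j += 1'
-- (both indices are guarded to be in range, so getD is exact for Python's words[j]/words[i])
def pvRunEnd (words : List String) (w : String) (j : Nat) : Nat :=
  if h : j < words.length ∧ words.getD j "" = w then pvRunEnd words w (j + 1) else j
termination_by words.length - j
decreasing_by omega

theorem pvRunEnd_ge (words : List String) (w : String) (j : Nat) : j ≤ pvRunEnd words w j := by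
  fun_induction pvRunEnd words w j with
  | case1 j h ih => omega
  | case2 j h => omega

-- outer while loop of Source B: peel one maximal run starting at i, keep words[i : i+min(j-i, cap)]
def pvBLoop (words : List String) (cap : Int) (i : Nat) : List String :=
  if _h : i < words.length then
    ((words.drop i).take (min (pvRunEnd words (words.getD i "") (i + 1) - i) cap.toNat)) ++
      pvBLoop words cap (pvRunEnd words (words.getD i "") (i + 1))
  else []
termination_by words.length - i
decreasing_by
  have := pvRunEnd_ge words (words.getD i "") (i + 1)
  omega

def remove_repetitions_py_alt (text : String) (max_repeat : Int) : String :=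
  let words := PySem.Str.split₀ text
  let cap := max max_repeat 1
  PySem.Str.join " " (pvBLoop words cap 0)

-- ===== PRECONDITION & SPEC =====
def Spec_remove_repetitions_py (text : String) (max_repeat : Int) (out : String) : Prop := out = remove_repetitions_py_alt text max_repeat
instance (text : String) (max_repeat : Int) (out : String) : Decidable (Spec_remove_repetitions_py text max_repeat out) := by unfold Spec_remove_repetitions_py; infer_instance

-- ===== CLAIM (what is proved, stated in full; the proofs are below) =====
def Claim_equal_remove_repetitions_py : Prop := ∀ (text : String) (max_repeat : Int), Dom_remove_repetitions_py text max_repeat → Spec_remove_repetitions_py text max_repeat (remove_repetitions_py text max_repeat)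

-- ===== LEMMAS AND PROOFS =====

-- number of leading copies of w in t
def pvLead (w : String) (t : List String) : Nat := (t.takeWhile (fun x => x = w)).length

-- canonical run-by-run description of the output word list (proof device shared by both sides)
def pvBList (cap : Int) : List String → List String
  | [] => []
  | w :: t =>
      List.replicate (min (pvLead w t + 1) cap.toNat) w ++ pvBList cap (t.drop (pvLead w t))
termination_by l => l.length
decreasing_by simp [pvLead]

theorem pvBList_nil (cap : Int) : pvBList cap [] = [] := by
  unfold pvBList; rfl

theorem pvBList_cons (cap : Int) (w : String) (t : List String) :
    pvBList cap (w :: t)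
      = List.replicate (min (pvLead w t + 1) cap.toNat) w ++ pvBList cap (t.drop (pvLead w t)) := by
  conv_lhs => unfold pvBList

-- A's loop body reformulated over (previous word, state)
def pvPStep (max_repeat : Int) (prev : Option String) (st : List String × Int) (w : String) : List String × Int :=
  if ¬ (some w = prev) then (st.1 ++ [w], 1)
  else if st.2 < max_repeat then (st.1 ++ [w], st.2 + 1)
  else st

def pvPFold (max_repeat : Int) (prev : Option String) (st : List String × Int) : List String → List String × Int
  | [] => st
  | w :: t => pvPFold max_repeat (some w) (pvPStep max_repeat prev st w) t

theorem pvLead_takeWhile (w : String) (t : List String) :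
    t.takeWhile (fun x => x = w) = List.replicate (pvLead w t) w := by
  rw [List.eq_replicate_iff]
  exact ⟨rfl, fun b hb => by simpa using List.mem_takeWhile_imp hb⟩

theorem pvDropWhile_eq_drop (p : String → Bool) (t : List String) :
    t.dropWhile p = t.drop (t.takeWhile p).length := by
  induction t with
  | nil => simp
  | cons a t ih =>
      by_cases h : p a
      · simp [h, ih]
      · simp [h]

theorem pvLead_split (w : String) (t : List String) :
    t = List.replicate (pvLead w t) w ++ t.drop (pvLead w t) := by
  conv_lhs => rw [← List.takeWhile_append_dropWhile (p := fun x => x = w) (l := t)]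
  rw [pvDropWhile_eq_drop, pvLead_takeWhile]
  simp [pvLead]

theorem pvHead_dropWhile (p : String → Bool) (t : List String) (a : String)
    (h : (t.dropWhile p).head? = some a) : p a = false := by
  induction t with
  | nil => simp at h
  | cons b t ih =>
      rw [List.dropWhile_cons] at h
      by_cases hb : p b
      · simp [hb] at h; exact ih h
      · simp [hb] at h; subst h; simpa using hb

theorem pvLead_drop_head (w : String) (t : List String) :
    (t.drop (pvLead w t)).head? ≠ some w := by
  have hdw : t.dropWhile (fun x => x = w) = t.drop (pvLead w t) := pvDropWhile_eq_drop _ t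
  rw [← hdw]
  intro h
  have := pvHead_dropWhile (fun x => x = w) t w h
  simp at this

theorem pvRunEnd_eq (words : List String) (w : String) (j : Nat) :
    pvRunEnd words w j = j + pvLead w (words.drop j) := by
  fun_induction pvRunEnd words w j with
  | case1 j h ih =>
      obtain ⟨hj, hv⟩ := h
      have hdrop : words.drop j = words[j] :: words.drop (j + 1) :=
        List.drop_eq_getElem_cons hj
      have hw : words[j] = w := by
        rw [List.getD_eq_getElem _ _ hj] at hv; exact hv
      rw [ih, hdrop]
      simp [pvLead, hw]
      omega
  | case2 j h =>
      rcases Nat.lt_or_ge j words.length with hj | hj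
      · have hv : ¬ words.getD j "" = w := fun hv => h ⟨hj, hv⟩
        have hdrop : words.drop j = words[j] :: words.drop (j + 1) :=
          List.drop_eq_getElem_cons hj
        have hw : ¬ (words[j] = w) := by
          rw [List.getD_eq_getElem _ _ hj] at hv; exact hv
        rw [hdrop]
        simp [pvLead, hw]
      · rw [List.drop_eq_nil_of_le hj]
        simp [pvLead]

theorem pvBLoop_eq (words : List String) (cap : Int) (i : Nat) :
    pvBLoop words cap i = pvBList cap (words.drop i) := by
  fun_induction pvBLoop words cap i with
  | case1 i h ih =>
      have hdrop : words.drop i = words[i] :: words.drop (i + 1) :=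
        List.drop_eq_getElem_cons h
      have hw : words.getD i "" = words[i] := List.getD_eq_getElem _ _ h
      set L := pvLead (words[i]) (words.drop (i + 1)) with hL
      have hj : pvRunEnd words (words.getD i "") (i + 1) = i + 1 + L := by
        rw [hw, pvRunEnd_eq, ← hL]
      have hsplit := pvLead_split (words[i]) (words.drop (i + 1))
      rw [← hL] at hsplit
      have htake : ((words.drop i).take (min (pvRunEnd words (words.getD i "") (i + 1) - i) cap.toNat))
          = List.replicate (min (L + 1) cap.toNat) (words[i]) := by
        rw [hj, hdrop, show i + 1 + L - i = L + 1 by omega]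
        conv_lhs => rw [hsplit]
        rw [show (words[i] :: (List.replicate L words[i] ++ (words.drop (i+1)).drop L))
              = List.replicate (L + 1) words[i] ++ (words.drop (i+1)).drop L by
            simp [List.replicate_succ]]
        rw [List.take_append_of_le_length (by simp), List.take_replicate]
        congr 1
        omega
      rw [htake, ih, hj, hdrop, pvBList_cons, ← hL]
      congr 2
      rw [List.drop_drop]
  | case2 i h =>
      rw [List.drop_eq_nil_of_le (by omega), pvBList_nil]

-- A's enumerate fold, anchored after a processed prefix, is pvPFold with prev = the prefix's last word
theorem pvFold_bridge (max_repeat : Int) :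
    ∀ (t pre : List String) (st : List String × Int),
      (PySem.List.enumerate t (pre.length : Int)).foldl (pvAStep (pre ++ t) max_repeat) st
        = pvPFold max_repeat pre.getLast? st t := by
  intro t
  induction t with
  | nil => intro pre st; simp [pvPFold, PySem.List.enumerate_nil]
  | cons w t ih =>
      intro pre st
      rw [PySem.List.enumerate_cons, List.foldl_cons]
      have hstep : pvAStep (pre ++ w :: t) max_repeat st ((pre.length : Int), w)
          = pvPStep max_repeat pre.getLast? st w := by
        cases pre with
        | nil => simp [pvAStep, pvPStep]
        | cons p ps =>
            have hne : ¬ ((((p :: ps : List String).length : Int)) = 0) := by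
              simp only [List.length_cons]
              push_cast
              omega
            have hget : PySem.List.pyGet? ((p :: ps) ++ w :: t) (((p :: ps : List String).length : Int) - 1)
                = (p :: ps : List String).getLast? := by
              have hlen : (((p :: ps : List String).length : Int)) - 1
                  = (((p :: ps : List String).length - 1 : Nat) : Int) := by
                simp
              rw [hlen, PySem.List.pyGet?_natCast,
                  List.getElem?_append_left (by simp),
                  List.getLast?_eq_getElem?]
            simp only [pvAStep, pvPStep]
            rw [hget]
            by_cases hcond : some w = (p :: ps : List String).getLast?
            · rw [if_neg (fun h => h.elim hne (fun hb => hb hcond)),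
                  if_neg (not_not_intro hcond)]
            · rw [if_pos (Or.inr hcond), if_pos hcond]
      rw [hstep]
      have hre : (pre ++ w :: t) = (pre ++ [w]) ++ t := by simp
      have hlen : (pre.length : Int) + 1 = (((pre ++ [w]).length : Nat) : Int) := by
        simp
      rw [hre, hlen, ih (pre ++ [w])]
      simp [pvPFold]

-- processing a run of w with prev = w: appends while count < max_repeat
theorem pvPFold_run (max_repeat : Int) (w : String) :
    ∀ (L : Nat) (res : List String) (c : Int) (r : List String),
      pvPFold max_repeat (some w) (res, c) (List.replicate L w ++ r)
        = pvPFold max_repeat (some w) (res ++ List.replicate (min L (max_repeat - c).toNat) w,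
            c + (min L (max_repeat - c).toNat : Nat)) r := by
  intro L
  induction L with
  | zero => intro res c r; simp
  | succ L ih =>
      intro res c r
      rw [List.replicate_succ, List.cons_append]
      show pvPFold max_repeat (some w) (pvPStep max_repeat (some w) (res, c) w) _ = _
      by_cases hc : c < max_repeat
      · have hstep : pvPStep max_repeat (some w) (res, c) w = (res ++ [w], c + 1) := by
          simp [pvPStep, hc]
        rw [hstep, ih]
        have hmin : min (L + 1) (max_repeat - c).toNat
            = min L (max_repeat - (c + 1)).toNat + 1 := by omega
        rw [hmin]
        congr 2
        · rw [show min L (max_repeat - (c+1)).toNat + 1 = 1 + min L (max_repeat - (c+1)).toNat by omega,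
              List.replicate_add]
          simp
        · push_cast; omega
      · have hstep : pvPStep max_repeat (some w) (res, c) w = (res, c) := by
          simp [pvPStep, hc]
        rw [hstep, ih]
        have h0 : (max_repeat - c).toNat = 0 := by omega
        have h0' : min (L + 1) (max_repeat - c).toNat = 0 := by omega
        simp [h0]

-- result of A's reformulated fold = the canonical run-by-run list
theorem pvPFold_eq_bList (max_repeat : Int) :
    ∀ (n : Nat) (t : List String) (prev : Option String) (res : List String) (c : Int),
      t.length ≤ n → (∀ u, prev = some u → t.head? ≠ some u) →
      (pvPFold max_repeat prev (res, c) t).1 = res ++ pvBList (max max_repeat 1) t := by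
  intro n
  induction n with
  | zero =>
      intro t prev res c hlen _
      have : t = [] := List.eq_nil_of_length_eq_zero (by omega)
      subst this; simp [pvPFold, pvBList_nil]
  | succ n ih =>
      intro t prev res c hlen hprev
      cases t with
      | nil => simp [pvPFold, pvBList_nil]
      | cons w t =>
          have hne : ¬ (some w = prev) := by
            intro h
            exact hprev w h.symm (by simp)
          have hstep : pvPStep max_repeat prev (res, c) w = (res ++ [w], 1) := by
            simp [pvPStep, hne]
          show (pvPFold max_repeat (some w) (pvPStep max_repeat prev (res, c) w) t).1 = _
          rw [hstep]
          set L := pvLead w t with hL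
          have hsplit := pvLead_split w t
          conv_lhs => rw [hsplit]
          rw [pvPFold_run]
          have hrlen : (t.drop L).length ≤ n := by
            have h1 : t.length = L + (t.drop L).length := by
              conv_lhs => rw [hsplit]
              simp
              omega
            simp at hlen
            omega
          rw [ih (t.drop L) (some w) _ _ hrlen (by
            intro u hu
            injection hu with hu; subst hu
            exact pvLead_drop_head w t)]
          rw [pvBList_cons, ← hL]
          rw [show min (L + 1) (max max_repeat 1).toNat
                = min L (max_repeat - 1).toNat + 1 by omega]
          rw [List.replicate_succ]
          simp

-- ===== VERDICT (by name: the statement is the Claim_ definition above) =====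
theorem remove_repetitions_py_spec : Claim_equal_remove_repetitions_py := by
  intro text max_repeat _
  unfold Spec_remove_repetitions_py
  have hA : remove_repetitions_py text max_repeat
      = PySem.Str.join " " (((PySem.List.enumerate (PySem.Str.split₀ text) 0).foldl
          (pvAStep (PySem.Str.split₀ text) max_repeat) ([], 1)).1) := rfl
  have hB : remove_repetitions_py_alt text max_repeat
      = PySem.Str.join " " (pvBLoop (PySem.Str.split₀ text) (max max_repeat 1) 0) := rfl
  rw [hA, hB]
  have h1 := pvFold_bridge max_repeat (PySem.Str.split₀ text) [] ([], 1)
  simp only [List.nil_append, List.length_nil, Nat.cast_zero, List.getLast?_nil] at h1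
  rw [h1]
  have h2 := pvPFold_eq_bList max_repeat (PySem.Str.split₀ text).length
    (PySem.Str.split₀ text) none [] 1 le_rfl (by simp)
  rw [h2]
  rw [pvBLoop_eq]
  simp
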